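-- pv_equiv track=rewrite | github.com/heerucan/PS | 프로그래머스/1/131128. 숫자 짝꿍/숫자 짝꿍.py | solution
-- ===== SOURCE A (Python) =====
-- def solution(X, Y):
--     answer = ''
--
--     for i in (set(X)&set(Y)): #중복을 제거하고 교집합을 찾아서
--         #교집합의 원소가 X와 Y에 몇 개 있는지 체크하고 그 중 더 적게 있는 곳만큼 for문을 돌린다.
--         for j in range(min(X.count(i), Y.count(i))):
--             answer += i
--
--     if answer == "":
--         return "-1"
--     elif set(answer) == {"0"}:
--         return "0"
--     else:
--         return "".join(sorted(answer, reverse=True))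
-- ===== SOURCE B (Python) =====
-- def solution(X, Y):
--     # Sort both strings descending and extract the common multiset with a
--     # two-pointer merge: the answer comes out already in descending order.
--     xs = sorted(X, reverse=True)
--     ys = sorted(Y, reverse=True)
--     res = []
--     i = j = 0
--     while i < len(xs) and j < len(ys):
--         if xs[i] == ys[j]:
--             res.append(xs[i])
--             i += 1
--             j += 1
--         elif xs[i] > ys[j]:
--             i += 1
--         else:
--             j += 1
--     if not res:
--         return "-1"
--     if res[0] == res[-1] == "0":
--         return "0"
--     return "".join(res)
-- ===== Notes on version B (the rewrite author's own statement) =====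
-- stated objective: alternative
-- what changed: B sorts both strings descending once and extracts the common multiset with a two-pointer merge that emits the answer already in descending order, replacing A's set-intersection loop with per-character .count scans followed by a full sort of the expanded answer; the all-zeros test becomes a first/last check on the sorted result.
import Mathlib
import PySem

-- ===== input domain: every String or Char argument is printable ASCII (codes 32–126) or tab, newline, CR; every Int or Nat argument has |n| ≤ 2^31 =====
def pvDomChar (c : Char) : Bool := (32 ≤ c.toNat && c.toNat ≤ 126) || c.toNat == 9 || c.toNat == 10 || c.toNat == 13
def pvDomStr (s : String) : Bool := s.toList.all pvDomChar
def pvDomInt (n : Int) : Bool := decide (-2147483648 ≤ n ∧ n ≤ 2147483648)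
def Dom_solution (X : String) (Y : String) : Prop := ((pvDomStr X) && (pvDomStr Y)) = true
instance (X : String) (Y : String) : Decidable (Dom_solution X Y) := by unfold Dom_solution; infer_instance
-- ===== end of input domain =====

-- B sorts both strings descending once and extracts the common multiset with a two-pointer
-- merge (already in descending order), instead of A's per-character .count scans over a set
-- intersection followed by sorting the whole answer.


-- ===== PORT A =====
def solution (X : String) (Y : String) : String :=
  let xs := X.toList
  let ys := Y.toList
  -- for i in (set(X) & set(Y)): for j in range(min(X.count(i), Y.count(i))): answer += i
  -- (the loop order over the set does not affect the returned value: it is '-1', '0', or a sort of answer)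
  let answer : List Char :=
    (PySem.Set.inter (PySem.Set.ofList xs) (PySem.Set.ofList ys)).foldl
      (fun answer i =>
        (PySem.List.pyRange 0 (min ((xs.count i : Int)) ((ys.count i : Int)))).foldl
          (fun answer _ => answer ++ [i]) answer) []
  if answer = [] then "-1"
  else if PySem.Set.equal (PySem.Set.ofList answer) ['0'] then "0"
  else String.mk (PySem.Chars.join [] ((PySem.List.sorted answer (fun c => c) true).map (fun c => [c])))

-- ===== PORT B =====
-- the while loop over indices i, j: advancing an index = dropping the head of that list
def pvMerge : List Char → List Char → List Char
  | [], _ => []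
  | _ :: _, [] => []
  | a :: xs, b :: ys =>
    if a = b then a :: pvMerge xs ys
    else if b < a then pvMerge xs (b :: ys)
    else pvMerge (a :: xs) ys
termination_by xs ys => xs.length + ys.length

def solution_alt (X : String) (Y : String) : String :=
  let xs := PySem.List.sorted X.toList (fun c => c) true
  let ys := PySem.List.sorted Y.toList (fun c => c) true
  let res := pvMerge xs ys
  if res = [] then "-1"
  else if res.headD ' ' = '0' ∧ res.getLastD ' ' = '0' then "0"
  else String.mk res

-- ===== PRECONDITION & SPEC =====
def Spec_solution (X : String) (Y : String) (out : String) : Prop := out = solution_alt X Y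
instance (X : String) (Y : String) (out : String) : Decidable (Spec_solution X Y out) := by unfold Spec_solution; infer_instance

-- ===== CLAIM (what is proved, stated in full; the proofs are below) =====
def Claim_equal_solution : Prop := ∀ (X : String) (Y : String), Dom_solution X Y → Spec_solution X Y (solution X Y)

-- ===== LEMMAS AND PROOFS =====

-- the multiset of shared characters contributed by one distinct common character
def pvRep (xs ys : List Char) (c : Char) : List Char :=
  List.replicate (min (xs.count c) (ys.count c)) c

lemma pvAnswerA (xs ys : List Char) :
    (PySem.Set.inter (PySem.Set.ofList xs) (PySem.Set.ofList ys)).foldl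
      (fun answer i =>
        (PySem.List.pyRange 0 (min ((xs.count i : Int)) ((ys.count i : Int)))).foldl
          (fun answer _ => answer ++ [i]) answer) []
    = (PySem.Set.inter (PySem.Set.ofList xs) (PySem.Set.ofList ys)).flatMap (pvRep xs ys) := by
  have h : ∀ (acc : List Char) (i : Char),
      (PySem.List.pyRange 0 (min ((xs.count i : Int)) ((ys.count i : Int)))).foldl
        (fun a _ => a ++ [i]) acc = acc ++ pvRep xs ys i := by
    intro acc i
    have hcast : (min ((xs.count i : Int)) ((ys.count i : Int)))
        = ((min (xs.count i) (ys.count i) : Nat) : Int) := by push_cast; ring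
    rw [hcast, PySem.List.pyRange_zero_natCast,
        PySem.List.foldl_append_singleton_eq_map (f := fun _ => i)]
    simp [pvRep, Function.comp_def, List.map_const']
  have h2 := PySem.List.foldl_congr_mem
      (PySem.Set.inter (PySem.Set.ofList xs) (PySem.Set.ofList ys))
      (fun answer i =>
        (PySem.List.pyRange 0 (min ((xs.count i : Int)) ((ys.count i : Int)))).foldl
          (fun a _ => a ++ [i]) answer)
      (fun answer i => answer ++ pvRep xs ys i)
      ([] : List Char)
      (fun acc i hi => h acc i)
  rw [h2, PySem.List.foldl_append_eq_flatMap, List.nil_append]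

-- in a descending list headed by b, anything above b does not occur
lemma pvCountZero (b c : Char) (ys : List Char)
    (hp : (b :: ys).Pairwise (fun p q => q ≤ p)) (h : b < c) : (b :: ys).count c = 0 := by
  rw [List.count_eq_zero]
  intro hmem
  rcases List.mem_cons.mp hmem with h1 | h1
  · exact absurd h1.symm (ne_of_lt h)
  · exact absurd (List.rel_of_pairwise_cons hp h1) (not_le.mpr h)

-- the two-pointer merge computes the multiset min of counts
lemma pvMergeCount (xs ys : List Char)
    (hx : xs.Pairwise (fun p q => q ≤ p)) (hy : ys.Pairwise (fun p q => q ≤ p)) (c : Char) :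
    (pvMerge xs ys).count c = min (xs.count c) (ys.count c) := by
  induction xs, ys using pvMerge.induct with
  | case1 ys => simp [pvMerge]
  | case2 a xs => simp [pvMerge]
  | case3 xs b ys ih =>
    have ih' := ih (List.Pairwise.of_cons hx) (List.Pairwise.of_cons hy)
    rw [pvMerge, if_pos rfl]
    simp only [List.count_cons, ih']
    split <;> omega
  | case4 a xs b ys hab hlt ih =>
    have ih' := ih (List.Pairwise.of_cons hx) hy
    rw [pvMerge, if_neg hab, if_pos hlt, ih']
    by_cases hc : a = c
    · subst hc
      have h0 : (b :: ys).count a = 0 := pvCountZero b a ys hy hlt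
      rw [h0]
      simp
    · simp [List.count_cons, hc]
  | case5 a xs b ys hab hnlt ih =>
    have ih' := ih hx (List.Pairwise.of_cons hy)
    have hba : a < b := lt_of_le_of_ne (not_lt.mp hnlt) hab
    rw [pvMerge, if_neg hab, if_neg hnlt, ih']
    by_cases hc : b = c
    · subst hc
      have h0 : (a :: xs).count b = 0 := pvCountZero a b xs hx hba
      rw [h0]
      simp
    · simp [List.count_cons, hc]

lemma pvMergeMem (xs ys : List Char) (x : Char) (hm : x ∈ pvMerge xs ys) : x ∈ xs := by
  induction xs, ys using pvMerge.induct with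
  | case1 ys => simp [pvMerge] at hm
  | case2 a xs => simp [pvMerge] at hm
  | case3 xs b ys ih =>
    rw [pvMerge, if_pos rfl] at hm
    rcases List.mem_cons.mp hm with h | h
    · simp [h]
    · exact List.mem_cons_of_mem b (ih h)
  | case4 a xs b ys hab hlt ih =>
    rw [pvMerge, if_neg hab, if_pos hlt] at hm
    exact List.mem_cons_of_mem a (ih hm)
  | case5 a xs b ys hab hnlt ih =>
    rw [pvMerge, if_neg hab, if_neg hnlt] at hm
    exact ih hm

lemma pvMergeSorted (xs ys : List Char)
    (hx : xs.Pairwise (fun p q => q ≤ p)) (hy : ys.Pairwise (fun p q => q ≤ p)) :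
    (pvMerge xs ys).Pairwise (fun p q => q ≤ p) := by
  induction xs, ys using pvMerge.induct with
  | case1 ys => simp [pvMerge]
  | case2 a xs => simp [pvMerge]
  | case3 xs b ys ih =>
    rw [pvMerge, if_pos rfl]
    refine List.pairwise_cons.mpr ⟨?_, ih (List.Pairwise.of_cons hx) (List.Pairwise.of_cons hy)⟩
    intro x hxm
    exact List.rel_of_pairwise_cons hx (pvMergeMem xs ys x hxm)
  | case4 a xs b ys hab hlt ih =>
    rw [pvMerge, if_neg hab, if_pos hlt]
    exact ih (List.Pairwise.of_cons hx) hy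
  | case5 a xs b ys hab hnlt ih =>
    rw [pvMerge, if_neg hab, if_neg hnlt]
    exact ih hx (List.Pairwise.of_cons hy)

-- count of c in a flatMap of replicate-blocks over distinct keys
lemma pvFlatCountAux (f : Char → Nat) (K : List Char) (hnd : K.Nodup) (c : Char) :
    (K.flatMap (fun k => List.replicate (f k) k)).count c = if c ∈ K then f c else 0 := by
  induction K with
  | nil => simp
  | cons k K ih =>
    have hndK := List.nodup_cons.mp hnd
    rw [List.flatMap_cons, List.count_append, ih hndK.2]
    by_cases hck : c = k
    · subst hck
      simp [List.count_replicate, hndK.1]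
    · have h0 : List.count c (List.replicate (f k) k) = 0 :=
        List.count_eq_zero.mpr (fun h => hck (List.eq_of_mem_replicate h))
      rw [h0]
      simp [hck]

-- A's expanded answer has the multiset min of counts
lemma pvFlatCount (xs ys : List Char) (K : List Char) (hnd : K.Nodup)
    (hK : ∀ c, c ∈ K ↔ c ∈ xs ∧ c ∈ ys) (c : Char) :
    (K.flatMap (pvRep xs ys)).count c = min (xs.count c) (ys.count c) := by
  have := pvFlatCountAux (fun k => min (xs.count k) (ys.count k)) K hnd c
  rw [show K.flatMap (pvRep xs ys)
        = K.flatMap (fun k => List.replicate (min (xs.count k) (ys.count k)) k) from rfl, this]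
  by_cases hc : c ∈ K
  · rw [if_pos hc]
  · rw [if_neg hc]
    rcases not_and_or.mp (fun h => hc ((hK c).mpr h)) with h | h
    · rw [List.count_eq_zero_of_not_mem h]; omega
    · rw [List.count_eq_zero_of_not_mem h]; omega

-- last element of a nonempty list is a member
lemma pvGetLastDMem : ∀ (l : List Char) (d : Char), l ≠ [] → l.getLastD d ∈ l
  | [], _, h => absurd rfl h
  | [a], _, _ => by simp [List.getLastD]
  | a :: b :: t, d, _ => by
      rw [List.getLastD_cons]
      exact List.mem_cons_of_mem a (pvGetLastDMem (b :: t) a (by simp))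

-- every element of a descending list lies between last and head
lemma pvBetween : ∀ (l : List Char) (d : Char), l.Pairwise (fun p q => q ≤ p) →
    ∀ x ∈ l, l.getLastD d ≤ x ∧ x ≤ l.headD d
  | [], _, _, x, hx => absurd hx (List.not_mem_nil)
  | a :: t, d, hp, x, hx => by
      rw [List.getLastD_cons]
      cases t with
      | nil =>
        rcases List.mem_singleton.mp hx with rfl
        simp [List.getLastD]
      | cons b t' =>
        rcases List.mem_cons.mp hx with rfl | hxt
        · constructor
          · exact List.rel_of_pairwise_cons hp (pvGetLastDMem (b :: t') x (by simp))
          · simp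
        · have ih := pvBetween (b :: t') a (List.Pairwise.of_cons hp) x hxt
          refine ⟨ih.1, ?_⟩
          have hxb : x ≤ b := by simpa using ih.2
          have hba : b ≤ a := List.rel_of_pairwise_cons hp (List.mem_cons_self)
          simpa using le_trans hxb hba

-- ===== VERDICT (by name: the statement is the Claim_ definition above) =====
theorem solution_spec : Claim_equal_solution := by
  intro X Y _
  unfold Spec_solution solution solution_alt
  simp only
  set xs := X.toList with hxs
  set ys := Y.toList with hys
  rw [pvAnswerA]
  set K := PySem.Set.inter (PySem.Set.ofList xs) (PySem.Set.ofList ys) with hKdef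
  set sx := PySem.List.sorted xs (fun c => c) true with hsx
  set sy := PySem.List.sorted ys (fun c => c) true with hsy
  set answer := K.flatMap (pvRep xs ys) with hans
  set res := pvMerge sx sy with hres
  have hKmem : ∀ c, c ∈ K ↔ c ∈ xs ∧ c ∈ ys := by
    intro c; rw [hKdef, PySem.Set.mem_inter]; simp [PySem.Set.mem_ofList]
  have hKnd : K.Nodup := PySem.Set.nodup_inter _ _ (PySem.Set.nodup_ofList xs)
  have hsxp : sx.Pairwise (fun p q => q ≤ p) := PySem.List.sorted_pairwise_rev _ _
  have hsyp : sy.Pairwise (fun p q => q ≤ p) := PySem.List.sorted_pairwise_rev _ _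
  have hcnt : ∀ c, answer.count c = res.count c := by
    intro c
    rw [hans, hres, pvFlatCount xs ys K hKnd hKmem c, pvMergeCount sx sy hsxp hsyp c,
        (PySem.List.sorted_perm xs (fun c => c) true).count_eq,
        (PySem.List.sorted_perm ys (fun c => c) true).count_eq]
  have hperm : answer.Perm res := List.perm_iff_count.mpr hcnt
  by_cases hnil : answer = []
  · have hrnil : res = [] := by
      rw [hnil] at hperm; exact List.Perm.eq_nil hperm.symm
    rw [if_pos hnil, if_pos hrnil]
  · have hrne : res ≠ [] := fun h => hnil (by rw [h] at hperm; exact List.Perm.eq_nil hperm)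
    rw [if_neg hnil, if_neg hrne]
    have hresp : res.Pairwise (fun p q => q ≤ p) := pvMergeSorted sx sy hsxp hsyp
    -- the two "all zeros" tests agree
    have hall : (PySem.Set.equal (PySem.Set.ofList answer) ['0']) = true
        ↔ (res.headD ' ' = '0' ∧ res.getLastD ' ' = '0') := by
      obtain ⟨r0, rt, hrt⟩ := List.exists_cons_of_ne_nil hrne
      rw [PySem.Set.equal_iff]
      constructor
      · intro h
        have hz : ∀ x ∈ res, x = '0' := by
          intro x hx
          have := (h x).mp
          rw [PySem.Set.mem_ofList] at this
          simpa using this (hperm.mem_iff.mpr hx)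
        refine ⟨hz _ ?_, hz _ (pvGetLastDMem res ' ' hrne)⟩
        rw [hrt]
        simp
      · rintro ⟨h1, h2⟩ x
        rw [PySem.Set.mem_ofList, hperm.mem_iff]
        constructor
        · intro hx
          have hb := pvBetween res ' ' hresp x hx
          have hx0 : x = '0' := le_antisymm (h1 ▸ hb.2) (h2 ▸ hb.1)
          simp [hx0]
        · intro hx
          have hx0 : x = '0' := by simpa using hx
          subst hx0
          have h0 : r0 = '0' := by
            rw [hrt] at h1
            simpa using h1
          rw [hrt, h0]
          simp
    by_cases h0 : (res.headD ' ' = '0' ∧ res.getLastD ' ' = '0')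
    · rw [if_pos (hall.mpr h0), if_pos h0]
    · rw [if_neg (fun h => h0 (hall.mp h)), if_neg h0]
      -- sorted answer descending = res
      have hsorted : PySem.List.sorted answer (fun c => c) true = res := by
        have hp1 : (PySem.List.sorted answer (fun c => c) true).Pairwise (fun p q => q ≤ p) :=
          PySem.List.sorted_pairwise_rev _ _
        have hp : (PySem.List.sorted answer (fun c => c) true).Perm res :=
          (PySem.List.sorted_perm _ _ _).trans hperm
        exact hp.eq_of_pairwise (fun a b _ _ h h' => le_antisymm h' h) hp1 hresp
      rw [hsorted, PySem.Chars.join_nil_singletons]
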